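-- pv_equiv track=rewrite | github.com/SDFIdk/FIRE | fire/cli/niv/regn.py | path_to_origin
-- ===== SOURCE A (Python) =====
-- from typing import Dict, List, Set, Tuple
--
-- def path_to_origin(
--     graph: Dict[str, Set[str]], start: str, origin: str, path: List[str] = []
-- ):
--     """
--     Mikroskopisk backtracking netkonnektivitetstest. Baseret på et
--     essay af Pythonstifteren Guido van Rossum, publiceret 1998 på
--     https://www.python.org/doc/essays/graphs/. Koden er her
--     moderniseret fra Python 1.5 til 3.7 og modificeret til at
--     arbejde på dict-over-set (originalen brugte dict-over-list)
--     """
--     path = path + [start]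
--     if start == origin:
--         return path
--     if start not in graph:
--         return None
--     for node in graph[start]:
--         if node not in path:
--             newpath = path_to_origin(graph, node, origin, path)
--             if newpath:
--                 return newpath
--     return None
-- ===== SOURCE B (Python) =====
-- def path_to_origin(graph, start, origin, path=[]):
--     """Iterative DFS with an explicit stack of REVERSED partial paths
--     (head = current node): paths are extended by prepending, and only
--     the returned path is reversed; neighbors are pushed in reverse so
--     the LIFO pop order matches the recursion's pre-order."""
--     stack = [[start] + path[::-1]]
--     while stack:
--         rp = stack.pop()
--         node = rp[0]
--         if node == origin:
--             return rp[::-1]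
--         if node in graph:
--             stack.extend([nb] + rp
--                          for nb in list(graph[node])[::-1]
--                          if nb not in rp)
--     return None
-- ===== Notes on version B (the rewrite author's own statement) =====
-- stated objective: alternative
-- what changed: Replaces the backtracking recursion by an iterative DFS over an explicit stack of reversed partial paths: paths are extended by prepending at the head and only the returned path is reversed; pushing neighbors in reverse keeps the recursion's pre-order so the identical path is returned.
import Mathlib
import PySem

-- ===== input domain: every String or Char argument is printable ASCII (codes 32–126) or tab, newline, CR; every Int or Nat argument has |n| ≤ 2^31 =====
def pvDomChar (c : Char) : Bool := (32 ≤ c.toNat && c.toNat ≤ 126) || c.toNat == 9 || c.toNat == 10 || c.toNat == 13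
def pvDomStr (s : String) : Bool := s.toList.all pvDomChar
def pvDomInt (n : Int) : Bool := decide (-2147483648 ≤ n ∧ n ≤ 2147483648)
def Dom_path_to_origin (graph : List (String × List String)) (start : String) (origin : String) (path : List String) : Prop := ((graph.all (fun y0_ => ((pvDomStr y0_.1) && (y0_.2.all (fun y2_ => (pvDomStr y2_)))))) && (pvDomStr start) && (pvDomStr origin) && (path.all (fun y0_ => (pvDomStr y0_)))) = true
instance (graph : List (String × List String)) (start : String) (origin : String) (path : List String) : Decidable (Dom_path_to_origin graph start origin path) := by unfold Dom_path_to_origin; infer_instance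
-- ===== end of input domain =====

-- B replaces A's backtracking recursion by an iterative DFS over an explicit stack of
-- REVERSED partial paths (extended by prepending, reversed only on return); the return
-- values agree on all inputs.

-- ===== PORT A =====
-- All strings that occur as a neighbor in the dict built from `graph`
-- (Python's `dict(graph)`: duplicate keys overwrite, as PySem.Dict.ofList does).
def pvUnivPTO (graph : List (String × List String)) : List String :=
  ((PySem.Dict.ofList graph).values).flatten

-- Termination measure: how many universe strings are not yet on the (partial) path.
def pvMuPTO (graph : List (String × List String)) (p : List String) : Nat :=
  ((pvUnivPTO graph).filter (fun x => decide (x ∉ p))).length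

lemma pvFilterConcatLt (u p : List String) (a : String) (ha : a ∈ u) (hap : a ∉ p) :
    (u.filter (fun x => decide (x ∉ p ++ [a]))).length
      < (u.filter (fun x => decide (x ∉ p))).length := by
  have heq : u.filter (fun x => decide (x ∉ p ++ [a]))
      = (u.filter (fun x => decide (x ∉ p))).filter (fun x => decide (¬ x = a)) := by
    rw [List.filter_filter]
    apply List.filter_congr
    intro x _
    by_cases h1 : x ∈ p <;> by_cases h2 : x = a <;> simp [h1, h2, List.mem_append]
  rw [heq]
  apply List.length_filter_lt_length_iff_exists.mpr
  exact ⟨a, List.mem_filter.mpr ⟨ha, by simp [hap]⟩, by simp⟩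

lemma pvMuConcatLt (graph : List (String × List String)) (p : List String) (a : String)
    (ha : a ∈ pvUnivPTO graph) (hap : a ∉ p) :
    pvMuPTO graph (p ++ [a]) < pvMuPTO graph p :=
  pvFilterConcatLt _ p a ha hap

lemma pvMemUnivOfGet (graph : List (String × List String)) {k : String} {nbrs : List String}
    (h : (PySem.Dict.ofList graph).get? k = some nbrs) {nb : String} (hnb : nb ∈ nbrs) :
    nb ∈ pvUnivPTO graph := by
  have hitems := PySem.Dict.mem_items_of_get?_eq_some _ h
  have hv : nbrs ∈ (PySem.Dict.ofList graph).values := by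
    simp only [PySem.Dict.values]
    exact List.mem_map_of_mem hitems
  exact List.mem_flatten.mpr ⟨nbrs, hv, hnb⟩

-- Literal port of A: the recursion, the early-origin check, the dict lookup and the
-- for-loop over neighbors pruned against the current path.  The loop with early
-- `return` is rendered as a fold carrying the Option accumulator; Python's
-- `if newpath:` tests non-None here, since the recursion never returns an empty list.
def path_to_origin (graph : List (String × List String)) (start : String) (origin : String) (path : List String) : Option (List String) :=
  let p := path ++ [start]
  if start = origin then some p
  else
    match h : (PySem.Dict.ofList graph).get? start with
    | none => none
    | some nbrs =>
      nbrs.attach.foldl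
        (fun acc nb =>
          match acc with
          | some r => some r
          | none =>
            if nb.1 ∈ p then none
            else path_to_origin graph nb.1 origin p)
        none
termination_by pvMuPTO graph (path ++ [start])
decreasing_by
  exact pvMuConcatLt graph (path ++ [start]) nb.1 (pvMemUnivOfGet graph h nb.2) (by assumption)

-- ===== PORT B =====
lemma pvMuConsLt (graph : List (String × List String)) (p : List String) (a : String)
    (ha : a ∈ pvUnivPTO graph) (hap : a ∉ p) :
    pvMuPTO graph (a :: p) < pvMuPTO graph p := by
  have heq : (pvUnivPTO graph).filter (fun x => decide (x ∉ a :: p))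
      = (pvUnivPTO graph).filter (fun x => decide (x ∉ p ++ [a])) := by
    apply List.filter_congr
    intro x _
    simp [List.mem_append, List.mem_cons, or_comm]
  unfold pvMuPTO
  rw [heq]
  exact pvFilterConcatLt _ p a ha hap

lemma pvStackChildrenLt (graph : List (String × List String)) (rp : List String)
    {node : String} {nbrs : List String}
    (h : (PySem.Dict.ofList graph).get? node = some nbrs) :
    ((((nbrs.filter (fun nb => decide (nb ∉ rp))).map (fun nb => nb :: rp)).map
        (fun q => ((pvUnivPTO graph).length + 1) ^ pvMuPTO graph q)).sum)
      < ((pvUnivPTO graph).length + 1) ^ pvMuPTO graph rp := by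
  set D := (pvUnivPTO graph).length with hD
  set C := nbrs.filter (fun nb => decide (nb ∉ rp)) with hC
  have hpowpos : ∀ m : Nat, 0 < (D + 1) ^ m := fun m => Nat.pow_pos (Nat.succ_pos D) (n := m)
  by_cases hCnil : C = []
  · rw [hCnil]; simpa using hpowpos (pvMuPTO graph rp)
  · obtain ⟨c0, hc0⟩ := List.exists_mem_of_ne_nil C hCnil
    have hmemU : ∀ x ∈ C, x ∈ pvUnivPTO graph ∧ x ∉ rp := by
      intro x hx
      rw [hC, List.mem_filter] at hx
      exact ⟨pvMemUnivOfGet graph h hx.1, by simpa using hx.2⟩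
    have hμpos : 1 ≤ pvMuPTO graph rp := by
      rcases hmemU c0 hc0 with ⟨hu, hnp⟩
      have : c0 ∈ (pvUnivPTO graph).filter (fun x => decide (x ∉ rp)) := by
        rw [List.mem_filter]; exact ⟨hu, by simpa using hnp⟩
      have := List.length_pos_of_mem (by exact this)
      unfold pvMuPTO; omega
    have hterm : ∀ x ∈ (C.map (fun nb => nb :: rp)).map
        (fun q => (D + 1) ^ pvMuPTO graph q), x ≤ (D + 1) ^ (pvMuPTO graph rp - 1) := by
      intro x hx
      rcases List.mem_map.mp hx with ⟨q, hq, rfl⟩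
      rcases List.mem_map.mp hq with ⟨nb, hnb, rfl⟩
      rcases hmemU nb hnb with ⟨hu, hnp⟩
      have hlt := pvMuConsLt graph rp nb hu hnp
      exact Nat.pow_le_pow_right (Nat.succ_pos D) (by omega)
    have hsum := List.sum_le_card_nsmul _ _ hterm
    have hlen : ((C.map (fun nb => nb :: rp)).map
        (fun q => (D + 1) ^ pvMuPTO graph q)).length ≤ D := by
      simp only [List.length_map]
      have h1 : C.length ≤ nbrs.length := by rw [hC]; exact List.length_filter_le _ _
      have h2 : nbrs.length ≤ D := by
        have hitems := PySem.Dict.mem_items_of_get?_eq_some _ h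
        have hv : nbrs ∈ (PySem.Dict.ofList graph).values := by
          simp only [PySem.Dict.values]
          exact List.mem_map_of_mem hitems
        have := (List.sublist_flatten_of_mem hv).length_le
        simpa [hD, pvUnivPTO] using this
      omega
    have hmul : ((C.map (fun nb => nb :: rp)).map
        ((fun q => (D + 1) ^ pvMuPTO graph q))).sum ≤ D * (D + 1) ^ (pvMuPTO graph rp - 1) := by
      calc _ ≤ _ := hsum
      _ ≤ D * (D + 1) ^ (pvMuPTO graph rp - 1) := by
          rw [smul_eq_mul]
          exact Nat.mul_le_mul_right _ hlen
    have hfin : D * (D + 1) ^ (pvMuPTO graph rp - 1) < (D + 1) ^ pvMuPTO graph rp := by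
      have : (D + 1) ^ pvMuPTO graph rp = (D + 1) * (D + 1) ^ (pvMuPTO graph rp - 1) := by
        conv_lhs => rw [show pvMuPTO graph rp = (pvMuPTO graph rp - 1) + 1 by omega]
        ring
      rw [this]
      exact Nat.mul_lt_mul_of_lt_of_le (by omega) le_rfl (hpowpos _)
    omega

-- Literal port of Source B: iterative DFS over a stack of REVERSED partial
-- paths (head = current node, `rp[0]`).  The Lean list's HEAD is the Python stack's
-- top (list end); Python extends with reversed neighbors, so the prepended children
-- appear here in original neighbor order.  The empty-entry branch is only a totality
-- guard: stack entries are never empty (Python's `[start] + …` / `[nb] + rp`).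
def path_to_origin_alt_run (graph : List (String × List String)) (origin : String) (stack : List (List String)) : Option (List String) :=
  match stack with
  | [] => none
  | [] :: rest => path_to_origin_alt_run graph origin rest
  | (node :: q) :: rest =>
    if node = origin then some (node :: q).reverse
    else
      match h : (PySem.Dict.ofList graph).get? node with
      | none => path_to_origin_alt_run graph origin rest
      | some nbrs =>
        path_to_origin_alt_run graph origin
          (((nbrs.filter (fun nb => decide (nb ∉ node :: q))).map (fun nb => nb :: node :: q)) ++ rest)
termination_by (stack.map (fun q => ((pvUnivPTO graph).length + 1) ^ pvMuPTO graph q)).sum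
decreasing_by
  all_goals simp only [List.map_cons, List.sum_cons, List.map_append, List.sum_append]
  all_goals first
    | · have hpos : 0 < ((pvUnivPTO graph).length + 1) ^ pvMuPTO graph ([] : List String) :=
          Nat.pow_pos (by omega)
        omega
    | · have hpos : 0 < ((pvUnivPTO graph).length + 1) ^ pvMuPTO graph (node :: q) :=
          Nat.pow_pos (by omega)
        omega
    | · have := pvStackChildrenLt graph (node :: q) h
        omega

def path_to_origin_alt (graph : List (String × List String)) (start : String) (origin : String) (path : List String) : Option (List String) :=
  path_to_origin_alt_run graph origin [start :: path.reverse]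

-- ===== PRECONDITION & SPEC =====
def Spec_path_to_origin (graph : List (String × List String)) (start : String) (origin : String) (path : List String) (out : Option (List String)) : Prop := out = path_to_origin_alt graph start origin path
instance (graph : List (String × List String)) (start : String) (origin : String) (path : List String) (out : Option (List String)) : Decidable (Spec_path_to_origin graph start origin path out) := by unfold Spec_path_to_origin; infer_instance

-- ===== CLAIM (what is proved, stated in full; the proofs are below) =====
def Claim_equal_path_to_origin : Prop := ∀ (graph : List (String × List String)) (start : String) (origin : String) (path : List String), Dom_path_to_origin graph start origin path → Spec_path_to_origin graph start origin path (path_to_origin graph start origin path)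

-- ===== LEMMAS AND PROOFS =====

-- First non-none element of a list of options (the DFS answer over a stack).
def pvFirst : List (Option (List String)) → Option (List String)
  | [] => none
  | o :: rest => match o with | some r => some r | none => pvFirst rest

lemma pvFirst_append (l₁ l₂ : List (Option (List String))) :
    pvFirst (l₁ ++ l₂) =
      match pvFirst l₁ with | some r => some r | none => pvFirst l₂ := by
  induction l₁ with
  | nil => simp [pvFirst]
  | cons o l ih => cases o <;> simp [pvFirst, ih]

-- What A computes from a (reversed) stack entry: resume the recursion at its head node.
def pvEval (graph : List (String × List String)) (origin : String) (rp : List String) : Option (List String) :=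
  match rp with
  | [] => none
  | node :: q => path_to_origin graph node origin q.reverse

-- A's for-loop (the fold) is the first non-none recursive result over the pruned neighbors.
lemma pvFoldFirstAttach (graph : List (String × List String)) (origin : String) (p : List String)
    (nbrs : List String) (l : List {x // x ∈ nbrs}) (acc : Option (List String)) :
    (l.foldl
        (fun acc nb =>
          match acc with
          | some r => some r
          | none => if nb.1 ∈ p then none else path_to_origin graph nb.1 origin p)
        acc)
      = match acc with
        | some r => some r
        | none => pvFirst (((l.map Subtype.val).filter (fun nb => decide (nb ∉ p))).map
            (fun nb => path_to_origin graph nb origin p)) := by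
  induction l generalizing acc with
  | nil => cases acc <;> simp [pvFirst]
  | cons nb l ih =>
    cases acc with
    | some r => simp only [List.foldl_cons]; rw [ih]
    | none =>
      by_cases hnb : nb.1 ∈ p
      · simp only [List.foldl_cons, if_pos hnb]
        rw [ih]
        simp [hnb]
      · simp only [List.foldl_cons, if_neg hnb]
        rw [ih]
        cases hres : path_to_origin graph nb.1 origin p <;>
          simp [hnb, pvFirst, hres]

lemma pvEval_unfold (graph : List (String × List String)) (origin : String)
    (node : String) (q : List String) (hne : node ≠ origin) :
    pvEval graph origin (node :: q) =
      match (PySem.Dict.ofList graph).get? node with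
      | none => none
      | some nbrs =>
        pvFirst ((nbrs.filter (fun nb => decide (nb ∉ node :: q))).map
          (fun nb => path_to_origin graph nb origin (node :: q).reverse)) := by
  show path_to_origin graph node origin q.reverse = _
  rw [path_to_origin]
  simp only [if_neg hne]
  split
  · rename_i heq
    rw [heq]
  · rename_i nbrs2 heq
    rw [heq]
    show List.foldl _ none nbrs2.attach
        = pvFirst ((nbrs2.filter (fun nb => decide (nb ∉ node :: q))).map
            (fun nb => path_to_origin graph nb origin (node :: q).reverse))
    have hfold := pvFoldFirstAttach graph origin (q.reverse ++ [node]) nbrs2 nbrs2.attach none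
    rw [List.attach_map_subtype_val] at hfold
    have hfilt : nbrs2.filter (fun nb => decide (nb ∉ q.reverse ++ [node]))
        = nbrs2.filter (fun nb => decide (nb ∉ node :: q)) := by
      apply List.filter_congr
      intro x _
      simp [List.mem_append, List.mem_reverse, List.mem_cons, or_comm]
    have hrev : (node :: q).reverse = q.reverse ++ [node] := by simp
    rw [hfold, hfilt, hrev]

-- The stack machine returns the first non-none resumed-recursion value on the stack.
lemma pvRunEq (graph : List (String × List String)) (origin : String) (stack : List (List String)) :
    path_to_origin_alt_run graph origin stack = pvFirst (stack.map (pvEval graph origin)) := by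
  fun_induction path_to_origin_alt_run graph origin stack
  case case1 => simp [pvFirst]
  case case2 rest ih =>
    rw [ih]
    simp [pvFirst, pvEval]
  case case3 q rest =>
    simp only [List.map_cons]
    show some (origin :: q).reverse = pvFirst (pvEval graph origin (origin :: q) :: _)
    rw [show pvEval graph origin (origin :: q)
        = path_to_origin graph origin origin q.reverse from rfl]
    rw [path_to_origin]
    simp [pvFirst]
  case case4 node q rest hor h ih =>
    rw [ih]
    simp only [List.map_cons]
    rw [show pvEval graph origin (node :: q) = none by
      rw [pvEval_unfold graph origin node q hor, h]]
    simp [pvFirst]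
  case case5 node q rest hor nbrs h ih =>
    rw [ih]
    simp only [List.map_append, List.map_cons, List.map_map]
    rw [pvFirst_append]
    have hch : ((nbrs.filter (fun nb => decide (nb ∉ node :: q))).map
          (pvEval graph origin ∘ fun nb => nb :: node :: q))
        = ((nbrs.filter (fun nb => decide (nb ∉ node :: q))).map
          (fun nb => path_to_origin graph nb origin (node :: q).reverse)) := by
      apply List.map_congr_left
      intro nb _
      simp [Function.comp, pvEval]
    have he : pvEval graph origin (node :: q)
        = pvFirst ((nbrs.filter (fun nb => decide (nb ∉ node :: q))).map
            (fun nb => path_to_origin graph nb origin (node :: q).reverse)) := by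
      rw [pvEval_unfold graph origin node q hor, h]
    rw [hch]
    conv_rhs => rw [show pvFirst (pvEval graph origin (node :: q)
        :: List.map (pvEval graph origin) rest)
      = (match pvEval graph origin (node :: q) with
         | some r => some r
         | none => pvFirst (List.map (pvEval graph origin) rest)) from rfl, he]

lemma pvMain (graph : List (String × List String)) (start : String) (origin : String)
    (path : List String) :
    path_to_origin graph start origin path = path_to_origin_alt graph start origin path := by
  unfold path_to_origin_alt
  rw [pvRunEq]
  simp only [List.map_cons, List.map_nil]
  show _ = pvFirst [path_to_origin graph start origin path.reverse.reverse]
  rw [List.reverse_reverse]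
  cases h : path_to_origin graph start origin path <;> simp [pvFirst]

-- ===== VERDICT (by name: the statement is the Claim_ definition above) =====
theorem path_to_origin_spec : Claim_equal_path_to_origin := by
  intro graph start origin path _
  unfold Spec_path_to_origin
  exact pvMain graph start origin path
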